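-- pv_equiv track=rewrite | github.com/hizonmh/axcelerate-workflow-automation | tracker/parsers.py | _resolve_duplicate_dedup_keys
-- ===== SOURCE A (Python) =====
-- def _resolve_duplicate_dedup_keys(records: list[dict]) -> list[dict]:
--     """Append sequence numbers to duplicate dedup keys within a batch.
--
--     When the same payer sends multiple payments of the same amount on the same
--     day (e.g. an agent paying for two different students), the base dedup key
--     is identical.  This function detects such collisions and appends |2, |3, …
--     to the duplicates so each transaction gets a unique key.  The first
--     occurrence keeps its original key for backward compatibility with existing
--     DB rows.  Sequence is based on file order (the order records appear in the
--     source file), which is stable across re-imports of the same file.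
--     """
--     from collections import defaultdict
--
--     # Group record indices by their dedup_key (preserves file order)
--     groups: dict[str, list[int]] = defaultdict(list)
--     for idx, rec in enumerate(records):
--         groups[rec["dedup_key"]].append(idx)
--
--     for key, indices in groups.items():
--         if len(indices) < 2:
--             continue
--         # First occurrence keeps the original key; subsequent ones get |2, |3, …
--         for seq, i in enumerate(indices[1:], start=2):
--             records[i]["dedup_key"] = f"{key}|{seq}"
--
--     return records
-- ===== SOURCE B (Python) =====
-- def _resolve_duplicate_dedup_keys(records: list[dict]) -> list[dict]:
--     """One streaming pass: keep a running count of each base dedup key; the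
--     second and later sightings of a base key get |2, |3, ... appended.
--     Mutates the record dicts in place (like the original) and returns records."""
--     seen: dict[str, int] = {}
--     for rec in records:
--         base = rec["dedup_key"]
--         cnt = seen.get(base, 0) + 1
--         seen[base] = cnt
--         if cnt >= 2:
--             rec["dedup_key"] = f"{base}|{cnt}"
--     return records
-- ===== Notes on version B (the rewrite author's own statement) =====
-- stated objective: simpler
-- what changed: Replaces the two-phase group-indices-by-key-then-assign-suffixes structure with a single streaming pass that keeps a running counter of base keys and renames a record the moment its running count reaches 2.
import Mathlib
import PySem

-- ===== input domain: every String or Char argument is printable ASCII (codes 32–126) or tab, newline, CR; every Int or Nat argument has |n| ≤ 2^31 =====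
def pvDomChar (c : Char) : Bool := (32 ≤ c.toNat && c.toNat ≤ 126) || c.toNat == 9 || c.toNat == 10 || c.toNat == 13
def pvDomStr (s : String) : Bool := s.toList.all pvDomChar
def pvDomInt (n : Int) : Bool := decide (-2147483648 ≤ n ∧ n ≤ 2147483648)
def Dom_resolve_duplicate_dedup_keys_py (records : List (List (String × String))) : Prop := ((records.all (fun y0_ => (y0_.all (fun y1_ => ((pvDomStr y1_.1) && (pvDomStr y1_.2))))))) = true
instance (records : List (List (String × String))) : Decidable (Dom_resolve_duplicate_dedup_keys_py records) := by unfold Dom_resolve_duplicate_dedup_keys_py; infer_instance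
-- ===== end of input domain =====

-- B rewrites A's two-phase "group indices by dedup key, then assign |2,|3,… suffixes"
-- as one streaming pass with a running counter of base keys (objective: simpler).
-- Both Pythons mutate the record dicts in place identically; the theorems below are
-- about the returned value.

-- shared tiny helpers: rec["dedup_key"] (read via getD "", Pre_ excludes the KeyError
-- inputs where the key is absent) and rec["dedup_key"] = v
def pvKey (rec : List (String × String)) : String :=
  (PySem.Dict.mk rec).getD "dedup_key" ""

def pvSetKey (rec : List (String × String)) (v : String) : List (String × String) :=
  ((PySem.Dict.mk rec).insert "dedup_key" v).items

-- ===== PORT A =====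
-- phase 1: groups: dict dedup_key -> list of indices, file order (defaultdict(list));
-- phase 2: for each group of ≥ 2, enumerate(indices[1:], start=2) gets key|seq.
-- (q.2.toNat is exact: enumerate indices are ≥ 0.)
def resolve_duplicate_dedup_keys_py (records : List (List (String × String))) : List (List (String × String)) :=
  let groups : PySem.Dict String (List Int) :=
    (PySem.List.enumerate records).foldl
      (fun g p => g.modify (pvKey p.2) [] (fun l => l ++ [p.1])) PySem.Dict.empty
  groups.items.foldl
    (fun rs kv =>
      if kv.2.length < 2 then rs
      else
        (PySem.List.enumerate (PySem.List.slice kv.2 (some 1) none) 2).foldl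
          (fun rs2 q => rs2.modify q.2.toNat
            (fun rec => pvSetKey rec (kv.1 ++ "|" ++ PySem.Int.toStr q.1)))
          rs)
    records

-- ===== PORT B =====
-- one pass: seen counts base keys; the cnt-th sighting (cnt ≥ 2) becomes base|cnt
def resolve_duplicate_dedup_keys_py_alt (records : List (List (String × String))) : List (List (String × String)) :=
  (records.foldl
    (fun (acc : List (List (String × String)) × PySem.Dict String Int) rec =>
      let base := pvKey rec
      let cnt : Int := acc.2.getD base 0 + 1
      (acc.1 ++ [if 2 ≤ cnt then pvSetKey rec (base ++ "|" ++ PySem.Int.toStr cnt) else rec],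
       acc.2.insert base cnt))
    ([], PySem.Dict.empty)).1

-- ===== PRECONDITION & SPEC =====
-- Pre_ excludes exactly the records without a "dedup_key" entry, on which A raises KeyError.
def Pre_resolve_duplicate_dedup_keys_py (records : List (List (String × String))) : Prop :=
  ∀ rec ∈ records, (PySem.Dict.mk rec).contains "dedup_key" = true
instance (records : List (List (String × String))) : Decidable (Pre_resolve_duplicate_dedup_keys_py records) := by unfold Pre_resolve_duplicate_dedup_keys_py; infer_instance

def pvWitness_resolve_duplicate_dedup_keys_py : (List (List (String × String))) :=
  [[("dedup_key", "a"), ("amount", "5")], [("dedup_key", "a")], [("dedup_key", "b")]]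

def Spec_resolve_duplicate_dedup_keys_py (records : List (List (String × String))) (out : List (List (String × String))) : Prop := out = resolve_duplicate_dedup_keys_py_alt records
instance (records : List (List (String × String))) (out : List (List (String × String))) : Decidable (Spec_resolve_duplicate_dedup_keys_py records out) := by unfold Spec_resolve_duplicate_dedup_keys_py; infer_instance

-- ===== CLAIM (what is proved, stated in full; the proofs are below) =====
def Claim_equal_resolve_duplicate_dedup_keys_py : Prop := ∀ (records : List (List (String × String))), Dom_resolve_duplicate_dedup_keys_py records → Pre_resolve_duplicate_dedup_keys_py records → Spec_resolve_duplicate_dedup_keys_py records (resolve_duplicate_dedup_keys_py records)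

-- ===== LEMMAS AND PROOFS =====

def pvSpecGo (pre : List String) : List (List (String × String)) → List (List (String × String))
  | [] => []
  | r :: rs =>
      (if 2 ≤ ((pre.count (pvKey r) : Int) + 1)
       then pvSetKey r (pvKey r ++ "|" ++ PySem.Int.toStr ((pre.count (pvKey r) : Int) + 1))
       else r) :: pvSpecGo (pre ++ [pvKey r]) rs

lemma pvB_go (rs : List (List (String × String))) :
    ∀ (out : List (List (String × String))) (pre : List String) (d : PySem.Dict String Int),
    (∀ b, d.getD b 0 = (pre.count b : Int)) →
    (rs.foldl
      (fun (acc : List (List (String × String)) × PySem.Dict String Int) rec =>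
        let base := pvKey rec
        let cnt : Int := acc.2.getD base 0 + 1
        (acc.1 ++ [if 2 ≤ cnt then pvSetKey rec (base ++ "|" ++ PySem.Int.toStr cnt) else rec],
         acc.2.insert base cnt))
      (out, d)).1 = out ++ pvSpecGo pre rs := by
  induction rs with
  | nil => intro out pre d h; simp [pvSpecGo]
  | cons r rs ih =>
    intro out pre d h
    simp only [List.foldl_cons, pvSpecGo]
    rw [h (pvKey r)]
    rw [ih (out ++ [if 2 ≤ ((pre.count (pvKey r) : Int) + 1) then pvSetKey r (pvKey r ++ "|" ++ PySem.Int.toStr ((pre.count (pvKey r) : Int) + 1)) else r]) (pre ++ [pvKey r])]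
    · simp
    · intro b
      rw [PySem.Dict.getD_insert, h b]
      by_cases hb : b = pvKey r
      · simp [hb, List.count_append]
      · rw [List.count_append, List.count_singleton']
        simp [hb]
        exact fun he => hb he.symm

lemma pv_mem_enumerate {α : Type} (xs : List α) :
    ∀ (s : Int) (q : Int × α), q ∈ PySem.List.enumerate xs s →
    ∃ (m : Nat), ∃ (hm : m < xs.length), q.1 = s + m ∧ q.2 = xs[m] := by
  induction xs with
  | nil => intro s q hq; simp [PySem.List.enumerate] at hq
  | cons x xs ih =>
    intro s q hq
    rw [PySem.List.enumerate_cons] at hq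
    rcases List.mem_cons.1 hq with h | h
    · exact ⟨0, by simp, by simp [h]⟩
    · obtain ⟨m, hm, h1, h2⟩ := ih (s+1) q h
      exact ⟨m+1, by simpa using hm, by push_cast; omega, by simpa using h2⟩

lemma pv_enum_filter_len (k : String) (xs : List (List (String × String))) :
    ∀ s, ((PySem.List.enumerate xs s).filter (fun p => pvKey p.2 == k)).length
      = (xs.map pvKey).count k := by
  induction xs with
  | nil => intro s; simp [PySem.List.enumerate]
  | cons x xs ih =>
    intro s
    rw [PySem.List.enumerate_cons]
    simp only [List.filter_cons, List.map_cons, List.count_cons]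
    by_cases hx : pvKey x = k <;> simp [hx, ih (s+1)]

def pvIdxs (records : List (List (String × String))) (k : String) : List Int :=
  ((PySem.List.enumerate records).filter (fun p => pvKey p.2 == k)).map (fun p => p.1)

lemma pvGroups_items (records : List (List (String × String))) :
    ((PySem.List.enumerate records).foldl
      (fun (g : PySem.Dict String (List Int)) p => g.modify (pvKey p.2) [] (fun l => l ++ [p.1]))
      PySem.Dict.empty).items
    = (PySem.Set.ofList (records.map pvKey)).map (fun k => (k, pvIdxs records k)) := by
  have hkeys : ((PySem.List.enumerate records).foldl
      (fun (g : PySem.Dict String (List Int)) p => g.modify (pvKey p.2) [] (fun l => l ++ [p.1]))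
      PySem.Dict.empty).keys = PySem.Set.ofList (records.map pvKey) := by
    rw [PySem.Dict.keys_foldl_modify_key (PySem.List.enumerate records) (fun p => pvKey p.2) [] (fun _ p l => l ++ [p.1]) PySem.Dict.empty]
    have hm : (PySem.List.enumerate records).map (fun p => pvKey p.2)
        = records.map pvKey := by
      rw [show (fun (p : Int × List (String × String)) => pvKey p.2) = pvKey ∘ (fun p => p.2) from rfl,
        ← List.map_map, PySem.List.map_snd_enumerate]
    rw [hm]
    rfl
  have hnd : ((PySem.List.enumerate records).foldl
      (fun (g : PySem.Dict String (List Int)) p => g.modify (pvKey p.2) [] (fun l => l ++ [p.1]))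
      PySem.Dict.empty).keys.Nodup := by
    exact PySem.Dict.nodup_keys_foldl_modify_key (PySem.List.enumerate records) (fun (p : Int × List (String × String)) => pvKey p.2) [] (fun _ p l => l ++ [p.1]) PySem.Dict.empty (by simp [PySem.Dict.keys, PySem.Dict.empty])
  rw [PySem.Dict.items_eq_map_keys _ hnd [], hkeys]
  apply List.map_congr_left
  intro k hk
  have hg : ((PySem.List.enumerate records).foldl
      (fun (g : PySem.Dict String (List Int)) p => g.modify (pvKey p.2) [] (fun l => l ++ [p.1]))
      PySem.Dict.empty).getD k [] = pvIdxs records k := by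
    have hfm : (PySem.List.enumerate records).foldl
        (fun (g : PySem.Dict String (List Int)) p => g.modify (pvKey p.2) [] (fun l => l ++ [p.1]))
        PySem.Dict.empty
      = ((PySem.List.enumerate records).map (fun p => (pvKey p.2, p.1))).foldl
        (fun (g : PySem.Dict String (List Int)) q => g.modify q.1 [] (fun l => l ++ [q.2]))
        PySem.Dict.empty := by
      rw [List.foldl_map]
    rw [hfm, PySem.Dict.getD_foldl_modify_append]
    simp [pvIdxs, List.filter_map, Function.comp_def]
  rw [hg]

lemma pvInner_len {α β : Type} (g : β → α → α) (pos : β → Nat) (l : List β) :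
    ∀ (rs : List α),
    (l.foldl (fun rs q => rs.modify (pos q) (g q)) rs).length = rs.length := by
  induction l with
  | nil => intro rs; rfl
  | cons q l ih => intro rs; simp [ih, List.length_modify]

lemma pvInner_miss {α β : Type} (g : β → α → α) (pos : β → Nat) (l : List β) :
    ∀ (rs : List α) (j : Nat) (hj : j < rs.length),
    (∀ q ∈ l, pos q ≠ j) →
    (l.foldl (fun rs q => rs.modify (pos q) (g q)) rs)[j]'(by rw [pvInner_len]; exact hj) = rs[j] := by
  induction l with
  | nil => intro rs j hj h; rfl
  | cons q l ih =>
    intro rs j hj h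
    simp only [List.foldl_cons]
    rw [ih _ j (by rw [List.length_modify]; exact hj) (fun q hq => h q (List.mem_cons_of_mem _ hq))]
    rw [List.getElem_modify]
    simp [h q (List.mem_cons_self)]

lemma pvInner_hit {α β : Type} (g : β → α → α) (pos : β → Nat) (l1 l2 : List β) (q0 : β) :
    ∀ (rs : List α) (j : Nat) (hj : j < rs.length),
    pos q0 = j → (∀ q ∈ l1, pos q ≠ j) → (∀ q ∈ l2, pos q ≠ j) →
    ((l1 ++ q0 :: l2).foldl (fun rs q => rs.modify (pos q) (g q)) rs)[j]'(by rw [pvInner_len]; exact hj)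
      = g q0 rs[j] := by
  intro rs j hj h0 h1 h2
  simp only [List.foldl_append, List.foldl_cons]
  rw [pvInner_miss g pos l2 _ j (by rw [List.length_modify, pvInner_len]; exact hj) h2]
  rw [List.getElem_modify]
  rw [pvInner_miss g pos l1 rs j hj h1]
  simp [h0]

def pvStep (rs : List (List (String × String))) (kv : String × List Int) : List (List (String × String)) :=
  if kv.2.length < 2 then rs
  else
    (PySem.List.enumerate (PySem.List.slice kv.2 (some 1) none) 2).foldl
      (fun rs2 q => rs2.modify q.2.toNat
        (fun rec => pvSetKey rec (kv.1 ++ "|" ++ PySem.Int.toStr q.1)))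
      rs

def pvTouches (kv : String × List Int) (j : Nat) : Prop :=
  ∃ q ∈ PySem.List.enumerate (PySem.List.slice kv.2 (some 1) none) 2, q.2.toNat = j

lemma pvStep_len (kv : String × List Int) (rs : List (List (String × String))) :
    (pvStep rs kv).length = rs.length := by
  unfold pvStep
  split
  · rfl
  · exact pvInner_len _ _ _ rs

lemma pvOuter_len (L : List (String × List Int)) :
    ∀ rs, (L.foldl pvStep rs).length = rs.length := by
  induction L with
  | nil => intro rs; rfl
  | cons kv L ih => intro rs; rw [List.foldl_cons, ih, pvStep_len]

lemma pvStep_miss (kv : String × List Int) (rs : List (List (String × String))) (j : Nat)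
    (hj : j < rs.length) (h : ¬ pvTouches kv j) :
    (pvStep rs kv)[j]'(by rw [pvStep_len]; exact hj) = rs[j] := by
  unfold pvStep
  unfold pvTouches at h
  push Not at h
  split
  · rfl
  · exact pvInner_miss _ _ _ rs j hj h

lemma pvOuter_miss (L : List (String × List Int)) :
    ∀ (rs : List (List (String × String))) (j : Nat) (hj : j < rs.length),
    (∀ kv ∈ L, ¬ pvTouches kv j) →
    (L.foldl pvStep rs)[j]'(by rw [pvOuter_len]; exact hj) = rs[j] := by
  induction L with
  | nil => intro rs j hj h; rfl
  | cons kv L ih =>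
    intro rs j hj h
    simp only [List.foldl_cons]
    rw [ih _ j (by rw [pvStep_len]; exact hj) (fun kv' h' => h kv' (List.mem_cons_of_mem _ h'))]
    exact pvStep_miss kv rs j hj (h kv List.mem_cons_self)

lemma pvSpecGo_length (rs : List (List (String × String))) :
    ∀ pre, (pvSpecGo pre rs).length = rs.length := by
  induction rs with
  | nil => intro pre; rfl
  | cons r rs ih => intro pre; simp [pvSpecGo, ih]

lemma pvB_eq_spec0 (records : List (List (String × String))) :
    (records.foldl
      (fun (acc : List (List (String × String)) × PySem.Dict String Int) rec =>
        let base := pvKey rec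
        let cnt : Int := acc.2.getD base 0 + 1
        (acc.1 ++ [if 2 ≤ cnt then pvSetKey rec (base ++ "|" ++ PySem.Int.toStr cnt) else rec],
         acc.2.insert base cnt))
      ([], PySem.Dict.empty)).1 = pvSpecGo [] records := by
  rw [pvB_go records [] [] PySem.Dict.empty (by intro b; simp [PySem.Dict.getD, PySem.Dict.empty, PySem.Dict.get?])]
  simp

lemma pvSpecGo_getElem (rs : List (List (String × String))) :
    ∀ (pre : List String) (j : Nat) (hj : j < rs.length),
    (pvSpecGo pre rs)[j]'(by rw [pvSpecGo_length]; exact hj) =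
      (if 2 ≤ (((pre ++ (rs.take (j+1)).map pvKey).count (pvKey (rs[j])) : Int))
       then pvSetKey (rs[j]) (pvKey (rs[j]) ++ "|" ++ PySem.Int.toStr (((pre ++ (rs.take (j+1)).map pvKey).count (pvKey (rs[j])) : Int)))
       else rs[j]) := by
  induction rs with
  | nil => intro pre j hj; simp at hj
  | cons r rs ih =>
    intro pre j hj
    cases j with
    | zero =>
      simp only [pvSpecGo, List.getElem_cons_zero, List.take_succ_cons, List.take_zero,
        List.map_cons, List.map_nil, List.count_append, List.count_cons, List.count_nil]
      have h1 : (List.count (pvKey r) pre + (0 + if (pvKey r == pvKey r) = true then 1 else 0)) = List.count (pvKey r) pre + 1 := by simp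
      rw [h1]
      push_cast
      rfl
    | succ j =>
      simp only [pvSpecGo, List.getElem_cons_succ, List.take_succ_cons, List.map_cons]
      rw [ih (pre ++ [pvKey r]) j (by simpa using hj)]
      simp [List.append_assoc]

lemma pv_mem_idxs (records : List (List (String × String))) (k : String) (i : Int)
    (h : i ∈ pvIdxs records k) :
    ∃ (m : Nat), ∃ (hm : m < records.length), i = (m : Int) ∧ pvKey (records[m]) = k := by
  unfold pvIdxs at h
  rcases List.mem_map.1 h with ⟨q, hq, rfl⟩
  rcases List.mem_filter.1 hq with ⟨hqe, hqk⟩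
  obtain ⟨m, hm, h1, h2⟩ := pv_mem_enumerate records 0 q hqe
  exact ⟨m, hm, by omega, by rw [← h2]; exact beq_iff_eq.1 hqk⟩

lemma pvOuter_hit (L1 L2 : List (String × List Int)) (kv0 : String × List Int)
    (rs : List (List (String × String))) (j : Nat) (hj : j < rs.length)
    (h2 : ∀ kv ∈ L2, ¬ pvTouches kv j) :
    ((L1 ++ kv0 :: L2).foldl pvStep rs)[j]'(by rw [pvOuter_len]; exact hj)
      = (pvStep (L1.foldl pvStep rs) kv0)[j]'(by rw [pvStep_len, pvOuter_len]; exact hj) := by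
  simp only [List.foldl_append, List.foldl_cons]
  exact pvOuter_miss L2 _ j (by rw [pvStep_len, pvOuter_len]; exact hj) h2

lemma pvA_eq_spec (records : List (List (String × String))) :
    resolve_duplicate_dedup_keys_py records = pvSpecGo [] records := by
  show (((PySem.List.enumerate records).foldl
      (fun (g : PySem.Dict String (List Int)) p => g.modify (pvKey p.2) [] (fun l => l ++ [p.1]))
      PySem.Dict.empty).items.foldl pvStep records) = pvSpecGo [] records
  rw [pvGroups_items]
  apply List.ext_getElem (by rw [pvOuter_len, pvSpecGo_length])
  intro j hj1 hj2
  have hjr : j < records.length := by rw [pvOuter_len] at hj1; exact hj1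
  rw [pvSpecGo_getElem records [] j hjr]
  set b := pvKey (records[j]'hjr) with hbdef
  set T := records.take j with hT
  set D := records.drop (j+1) with hD
  have hTlen : T.length = j := by rw [hT, List.length_take]; omega
  have hrec : records = T ++ (records[j]'hjr) :: D := by
    rw [hT, hD, ← List.drop_eq_getElem_cons hjr, List.take_append_drop]
  set F1 := ((PySem.List.enumerate T 0).filter (fun p => pvKey p.2 == b)).map (fun p => p.1) with hF1
  set F2 := ((PySem.List.enumerate D ((j : Int)+1)).filter (fun p => pvKey p.2 == b)).map (fun p => p.1) with hF2
  have hidxs : pvIdxs records b = F1 ++ (j : Int) :: F2 := by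
    unfold pvIdxs
    conv_lhs => rw [hrec]
    rw [PySem.List.enumerate_append, PySem.List.enumerate_cons, hTlen]
    rw [List.filter_append, List.filter_cons]
    simp only [zero_add, hbdef, beq_self_eq_true, if_pos, List.map_append, List.map_cons]
    rfl
  have hF1b : ∀ i ∈ F1, 0 ≤ i ∧ i < (j : Int) := by
    intro i hi
    rcases List.mem_map.1 hi with ⟨q, hq, rfl⟩
    obtain ⟨m, hm, h1, _⟩ := pv_mem_enumerate T 0 q (List.mem_filter.1 hq).1
    rw [hTlen] at hm
    omega
  have hF2b : ∀ i ∈ F2, (j : Int) < i := by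
    intro i hi
    rcases List.mem_map.1 hi with ⟨q, hq, rfl⟩
    obtain ⟨m, hm, h1, _⟩ := pv_mem_enumerate D ((j : Int)+1) q (List.mem_filter.1 hq).1
    omega
  have hF1len : F1.length = (T.map pvKey).count b := by
    rw [hF1, List.length_map, pv_enum_filter_len]
  set p := (T.map pvKey).count b with hp
  have hc : ((records.take (j+1)).map pvKey).count b = p + 1 := by
    rw [List.take_add_one, List.getElem?_eq_getElem hjr]
    simp only [Option.toList_some, List.map_append, List.map_cons, List.map_nil,
      List.count_append, ← hT]
    simp [← hbdef]
    exact hp.symm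
  have hother : ∀ k, k ≠ b → ¬ pvTouches (k, pvIdxs records k) j := by
    intro k hk ht
    obtain ⟨q, hq, hqj⟩ := ht
    have hq2 : q.2 ∈ PySem.List.slice (pvIdxs records k) (some 1) none := by
      rw [← PySem.List.map_snd_enumerate (PySem.List.slice (pvIdxs records k) (some 1) none) 2]
      exact List.mem_map_of_mem hq
    rw [show PySem.List.slice (pvIdxs records k) (some 1) none = (pvIdxs records k).drop 1 from by simp [pysem]] at hq2
    obtain ⟨m, hm, h1, h2⟩ := pv_mem_idxs records k q.2 (List.mem_of_mem_drop hq2)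
    rw [h1] at hqj
    simp at hqj
    subst hqj
    exact hk (by rw [← h2])
  rcases Nat.eq_zero_or_pos p with hp0 | hppos
  · -- first occurrence: no group touches position j
    have hF1nil : F1 = [] := List.eq_nil_of_length_eq_zero (by rw [hF1len, hp0])
    have hbt : ¬ pvTouches (b, pvIdxs records b) j := by
      intro ht
      obtain ⟨q, hq, hqj⟩ := ht
      have hq2 : q.2 ∈ PySem.List.slice (pvIdxs records b) (some 1) none := by
        rw [← PySem.List.map_snd_enumerate (PySem.List.slice (pvIdxs records b) (some 1) none) 2]
        exact List.mem_map_of_mem hq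
      rw [show PySem.List.slice (pvIdxs records b) (some 1) none = (pvIdxs records b).drop 1 from by simp [pysem],
        hidxs, hF1nil] at hq2
      simp only [List.nil_append, List.drop_one, List.tail_cons] at hq2
      have := hF2b q.2 hq2
      omega
    have hmiss : ∀ kv ∈ (PySem.Set.ofList (records.map pvKey)).map (fun k => (k, pvIdxs records k)), ¬ pvTouches kv j := by
      intro kv hkv
      rcases List.mem_map.1 hkv with ⟨k, hkmem, rfl⟩
      by_cases hkb : k = b
      · rw [hkb]; exact hbt
      · exact hother k hkb
    rw [pvOuter_miss _ records j hjr hmiss]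
    rw [List.nil_append, hc, hp0]
    norm_num
  · obtain ⟨f0, F1', hF1c⟩ : ∃ f0 F1', F1 = f0 :: F1' := by
      cases hF1x : F1 with
      | nil => rw [hF1x] at hF1len; simp at hF1len; omega
      | cons f0 F1' => exact ⟨f0, F1', rfl⟩
    have hbmem : b ∈ PySem.Set.ofList (records.map pvKey) := by
      rw [PySem.Set.mem_ofList]
      exact List.mem_map.2 ⟨records[j]'hjr, List.getElem_mem hjr, rfl⟩
    obtain ⟨K1, K2, hsplit⟩ := List.append_of_mem hbmem
    have hnd : (PySem.Set.ofList (records.map pvKey)).Nodup := PySem.Set.nodup_ofList _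
    rw [hsplit] at hnd
    have hndp := List.nodup_append.1 hnd
    have hbK1 : b ∉ K1 := by
      intro h
      exact hndp.2.2 b h b List.mem_cons_self rfl
    have hbK2 : b ∉ K2 := (List.nodup_cons.1 hndp.2.1).1
    have hmiss1 : ∀ kv ∈ K1.map (fun k => (k, pvIdxs records k)), ¬ pvTouches kv j := by
      intro kv hkv
      rcases List.mem_map.1 hkv with ⟨k, hkmem, rfl⟩
      exact hother k (fun he => hbK1 (he ▸ hkmem))
    have hmiss2 : ∀ kv ∈ K2.map (fun k => (k, pvIdxs records k)), ¬ pvTouches kv j := by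
      intro kv hkv
      rcases List.mem_map.1 hkv with ⟨k, hkmem, rfl⟩
      exact hother k (fun he => hbK2 (he ▸ hkmem))
    simp only [hsplit, List.map_append, List.map_cons]
    rw [pvOuter_hit _ _ _ records j hjr hmiss2]
    set rs' := ((K1.map (fun k => (k, pvIdxs records k))).foldl pvStep records) with hrs'
    have hrs'len : rs'.length = records.length := pvOuter_len _ _
    have hj' : j < rs'.length := by omega
    have hrs'j : rs'[j]'hj' = records[j]'hjr := pvOuter_miss _ records j hjr hmiss1
    have hlen2 : ¬ ((b, pvIdxs records b).2.length < 2) := by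
      simp only [hidxs, hF1c, List.cons_append, List.length_cons, List.length_append]
      omega
    have hstep : pvStep rs' (b, pvIdxs records b) =
        (PySem.List.enumerate (PySem.List.slice (pvIdxs records b) (some 1) none) 2).foldl
          (fun rs2 q => rs2.modify q.2.toNat
            (fun rec => pvSetKey rec (b ++ "|" ++ PySem.Int.toStr q.1)))
          rs' := by
      unfold pvStep
      rw [if_neg hlen2]
    have hdrop : PySem.List.slice (pvIdxs records b) (some 1) none = F1' ++ (j : Int) :: F2 := by
      rw [hidxs, hF1c]
      simp [pysem]
    have henum : PySem.List.enumerate (F1' ++ (j : Int) :: F2) 2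
        = PySem.List.enumerate F1' 2 ++ ((2 + (F1'.length : Int)), (j : Int)) :: PySem.List.enumerate F2 (2 + (F1'.length : Int) + 1) := by
      rw [PySem.List.enumerate_append, PySem.List.enumerate_cons]
    have hm1 : ∀ q ∈ PySem.List.enumerate F1' 2, (fun q : Int × Int => q.2.toNat) q ≠ j := by
      intro q hq
      have hq2 : q.2 ∈ F1' := by
        rw [← PySem.List.map_snd_enumerate F1' 2]
        exact List.mem_map_of_mem hq
      have := hF1b q.2 (hF1c ▸ List.mem_cons_of_mem f0 hq2)
      simp only []
      omega
    have hm2 : ∀ q ∈ PySem.List.enumerate F2 (2 + (F1'.length : Int) + 1), (fun q : Int × Int => q.2.toNat) q ≠ j := by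
      intro q hq
      have hq2 : q.2 ∈ F2 := by
        rw [← PySem.List.map_snd_enumerate F2 (2 + (F1'.length : Int) + 1)]
        exact List.mem_map_of_mem hq
      have := hF2b q.2 hq2
      simp only []
      omega
    have hhit := pvInner_hit
      (fun (q : Int × Int) rec => pvSetKey rec (b ++ "|" ++ PySem.Int.toStr q.1))
      (fun q : Int × Int => q.2.toNat)
      (PySem.List.enumerate F1' 2)
      (PySem.List.enumerate F2 (2 + (F1'.length : Int) + 1))
      ((2 + (F1'.length : Int)), (j : Int))
      rs' j hj' (by simp) hm1 hm2
    have hfold : (pvStep rs' (b, pvIdxs records b))[j]'(by rw [pvStep_len]; exact hj')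
        = pvSetKey (rs'[j]'hj') (b ++ "|" ++ PySem.Int.toStr (2 + (F1'.length : Int))) := by
      simp only [hstep, hdrop, henum]
      exact hhit
    rw [hfold, hrs'j, List.nil_append, hc]
    have hcond : 2 ≤ ((p + 1 : Nat) : Int) := by push_cast; omega
    rw [if_pos hcond]
    have harg : (2 + (F1'.length : Int)) = ((p + 1 : Nat) : Int) := by
      have h1 : F1.length = p := hF1len
      rw [hF1c, List.length_cons] at h1
      push_cast
      omega
    rw [harg]

lemma pvB_eq_spec (records : List (List (String × String))) :
    resolve_duplicate_dedup_keys_py_alt records = pvSpecGo [] records := by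
  unfold resolve_duplicate_dedup_keys_py_alt
  exact pvB_eq_spec0 records

-- ===== VERDICT (by name: the statement is the Claim_ definition above) =====
theorem resolve_duplicate_dedup_keys_py_spec : Claim_equal_resolve_duplicate_dedup_keys_py := by
  intro records _ _
  unfold Spec_resolve_duplicate_dedup_keys_py
  rw [pvA_eq_spec, pvB_eq_spec]
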